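-- pv_equiv track=rewrite | github.com/Lenovo-AI-Lab-GNU-Annotation/Pre_Extract_Case | preExtractCase_v02.py | extractCase
-- ===== SOURCE A (Python) =====
-- def extractCase(__chatlog__):
--     case=''
--     textNum=0
--     chatlog_list=__chatlog__.split('\n')
--     for line in chatlog_list:
--         line=line.strip()
--         if '\' disconnected ' in line:
--             continue
--
--         if 'Bot(' not in line and '(text)' in line:
--             textNum+=1
--             if len(case)<len(line):
--                 case=line
--
--     return case,textNum
-- ===== SOURCE B (Python) =====
-- def extractCase(__chatlog__):
--     # divide-and-conquer over the line list: solve halves, merge (prefer left on length ties)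
--     lines = __chatlog__.split('\n')
--
--     def solve(lo, hi):
--         if hi - lo == 1:
--             line = lines[lo].strip()
--             if "' disconnected " in line or 'Bot(' in line or '(text)' not in line:
--                 return '', 0
--             return line, 1
--         mid = (lo + hi) // 2
--         lc, ln = solve(lo, mid)
--         rc, rn = solve(mid, hi)
--         return (lc if len(lc) >= len(rc) else rc), ln + rn
--
--     return solve(0, len(lines))
-- ===== Notes on version B (the rewrite author's own statement) =====
-- stated objective: alternative
-- what changed: Replaces A's single left-to-right fused accumulation loop by a divide-and-conquer recursion over index ranges of the line list: each half is solved independently and the results are merged (longest line preferring the left half on ties, counts summed).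
import Mathlib
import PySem

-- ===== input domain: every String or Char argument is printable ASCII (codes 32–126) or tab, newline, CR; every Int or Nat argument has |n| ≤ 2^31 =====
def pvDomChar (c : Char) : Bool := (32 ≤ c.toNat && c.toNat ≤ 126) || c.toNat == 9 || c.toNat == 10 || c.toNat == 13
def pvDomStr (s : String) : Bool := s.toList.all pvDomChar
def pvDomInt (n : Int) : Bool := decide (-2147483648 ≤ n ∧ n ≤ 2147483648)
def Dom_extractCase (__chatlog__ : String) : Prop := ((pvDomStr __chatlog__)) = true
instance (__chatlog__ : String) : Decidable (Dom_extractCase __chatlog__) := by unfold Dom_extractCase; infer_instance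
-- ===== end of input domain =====

-- B replaces A's fused left-to-right loop by a divide-and-conquer recursion over the line list (merge: longer result, left preferred on ties; counts summed); objective: alternative.

-- ===== PORT A =====
def extractCase (__chatlog__ : String) : String × Int :=
  let chatlog_list := (PySem.Str.split? __chatlog__ "\n").getD []
  chatlog_list.foldl
    (fun (acc : String × Int) line =>
      let line := PySem.Str.strip line
      if PySem.Str.isIn "' disconnected " line then acc
      else if !PySem.Str.isIn "Bot(" line && PySem.Str.isIn "(text)" line then
        let textNum := acc.2 + 1
        if PySem.Str.len acc.1 < PySem.Str.len line then (line, textNum) else (acc.1, textNum)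
      else acc)
    ("", 0)

-- ===== PORT B =====
-- solve(lo,hi) on index ranges becomes recursion on the sublist lines[lo:hi]; Python's
-- mid = (lo+hi)//2 corresponds to splitting the sublist at length/2 (exact: (lo+hi)//2 - lo = (hi-lo)//2 for 0 ≤ lo ≤ hi).
def pvSolve : List String → String × Int
  | [] => ("", 0)  -- unreachable for inputs coming from split (always ≥ 1 line); totality only
  | [l0] =>
      let line := PySem.Str.strip l0
      if PySem.Str.isIn "' disconnected " line || PySem.Str.isIn "Bot(" line
          || !PySem.Str.isIn "(text)" line then ("", 0)
      else (line, 1)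
  | a :: b :: rest =>
      let mid := (a :: b :: rest).length / 2
      let left := pvSolve ((a :: b :: rest).take mid)
      let right := pvSolve ((a :: b :: rest).drop mid)
      ((if PySem.Str.len right.1 ≤ PySem.Str.len left.1 then left.1 else right.1),
        left.2 + right.2)
  termination_by l => l.length
  decreasing_by
    · simp only [List.length_take, List.length_cons]; omega
    · simp only [List.length_drop, List.length_cons]; omega

def extractCase_alt (__chatlog__ : String) : String × Int :=
  pvSolve ((PySem.Str.split? __chatlog__ "\n").getD [])

-- ===== PRECONDITION & SPEC =====
def Spec_extractCase (__chatlog__ : String) (out : String × Int) : Prop := out = extractCase_alt __chatlog__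
instance (__chatlog__ : String) (out : String × Int) : Decidable (Spec_extractCase __chatlog__ out) := by unfold Spec_extractCase; infer_instance

-- ===== CLAIM =====
def Claim_equal_extractCase : Prop := ∀ (__chatlog__ : String), Dom_extractCase __chatlog__ → Spec_extractCase __chatlog__ (extractCase __chatlog__)

-- ===== LEMMAS AND PROOFS =====

def pvPick (c l : String) : String := if PySem.Str.len c < PySem.Str.len l then l else c

def pvKeep (l : String) : Bool :=
  !PySem.Str.isIn "' disconnected " l && (!PySem.Str.isIn "Bot(" l && PySem.Str.isIn "(text)" l)

def pvT (l : List String) : List String := (l.map PySem.Str.strip).filter pvKeep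

lemma pvLenNonneg (s : String) : 0 ≤ PySem.Str.len s := by
  rw [PySem.Str.len_eq]; positivity

lemma pvLenPos (l : String) (h : PySem.Str.isIn "(text)" l = true) :
    PySem.Str.len "" < PySem.Str.len l := by
  rw [PySem.Str.isIn_iff_infix] at h
  have hne : l.toList ≠ [] := by
    intro he; rw [he] at h; simp [List.infix_nil] at h
  have h0 : PySem.Str.len "" = 0 := by decide
  have hl0 : l.toList.length ≠ 0 := fun h0 => hne (List.eq_nil_of_length_eq_zero h0)
  rw [h0, PySem.Str.len_eq]; omega

-- A's fused loop, generically: fold of the filter-then-pick form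
lemma pvLoopA {α : Type} (keep1 keep2 : α → Bool) (key : α → Int) (st : α → α)
    (ls : List α) (c : α) (n : Int) :
    ls.foldl
      (fun (acc : α × Int) line =>
        let line := st line
        if keep1 line then acc
        else if keep2 line then
          let textNum := acc.2 + 1
          if key acc.1 < key line then (line, textNum) else (acc.1, textNum)
        else acc)
      (c, n)
    = (((ls.map st).filter (fun l => !keep1 l && keep2 l)).foldl
        (fun c l => if key c < key l then l else c) c,
       n + ((ls.map st).filter (fun l => !keep1 l && keep2 l)).length) := by
  induction ls generalizing c n with
  | nil => simp
  | cons x rest ih =>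
    simp only [List.foldl_cons, List.map_cons, List.filter_cons]
    by_cases h1 : keep1 (st x) = true
    · simp [h1, ih]
    · have h1' : keep1 (st x) = false := by simpa using h1
      by_cases h2 : keep2 (st x) = true
      · by_cases h3 : key c < key (st x)
        · simp only [h1', h2, h3, Bool.not_false, Bool.true_and, Bool.false_eq_true,
            if_false, if_true, ih, List.foldl_cons, List.length_cons, Prod.mk.injEq]
          exact ⟨trivial, by push_cast; ring⟩
        · simp only [h1', h2, h3, Bool.not_false, Bool.true_and, Bool.false_eq_true,
            if_false, if_true, ih, List.foldl_cons, List.length_cons, Prod.mk.injEq]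
          exact ⟨trivial, by push_cast; ring⟩
      · have h2' : keep2 (st x) = false := by simpa using h2
        simp [h1', h2', ih]

-- B's single-line reject test is the negation of the keep test
lemma pvRejectEq (s : String) :
    (PySem.Str.isIn "' disconnected " s || PySem.Str.isIn "Bot(" s
      || !PySem.Str.isIn "(text)" s) = !pvKeep s := by
  unfold pvKeep
  cases PySem.Str.isIn "' disconnected " s <;> cases PySem.Str.isIn "Bot(" s <;>
    cases PySem.Str.isIn "(text)" s <;> rfl

lemma pvKeep_text (s : String) (h : pvKeep s = true) : PySem.Str.isIn "(text)" s = true := by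
  unfold pvKeep at h
  exact (Bool.and_eq_true_iff.mp ((Bool.and_eq_true_iff.mp h).2)).2

-- fold from an arbitrary start = merge of the start with the fold from ""
lemma pvFoldChar (ys : List String) (b : String) :
    ys.foldl pvPick b
      = if PySem.Str.len (ys.foldl pvPick "") ≤ PySem.Str.len b then b
        else ys.foldl pvPick "" := by
  induction ys generalizing b with
  | nil =>
    simp only [List.foldl_nil]
    rw [if_pos]
    have hb := pvLenNonneg b
    have h0 : PySem.Str.len "" = 0 := by decide
    omega
  | cons y r ih =>
    simp only [List.foldl_cons]
    rw [ih (pvPick b y), ih (pvPick "" y)]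
    have hb := pvLenNonneg b
    have hy := pvLenNonneg y
    have hm := pvLenNonneg (r.foldl pvPick "")
    have h0 : PySem.Str.len "" = 0 := by decide
    simp only [pvPick, h0]
    split_ifs <;> first | rfl | omega

lemma pvFoldAppend (t1 t2 : List String) :
    (t1 ++ t2).foldl pvPick ""
      = if PySem.Str.len (t2.foldl pvPick "") ≤ PySem.Str.len (t1.foldl pvPick "")
        then t1.foldl pvPick "" else t2.foldl pvPick "" := by
  rw [List.foldl_append]; exact pvFoldChar t2 _

lemma pvT_append (t1 t2 : List String) : pvT (t1 ++ t2) = pvT t1 ++ pvT t2 := by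
  simp [pvT]

lemma pvSolve_eq : ∀ (n : Nat) (l : List String), l.length ≤ n →
    pvSolve l = ((pvT l).foldl pvPick "", ((pvT l).length : Int)) := by
  intro n
  induction n with
  | zero =>
    intro l hl
    have : l = [] := List.eq_nil_of_length_eq_zero (Nat.le_zero.mp hl)
    subst this
    simp [pvSolve, pvT]
  | succ n ih =>
    intro l hl
    match l with
    | [] => simp [pvSolve, pvT]
    | [x] =>
      have hstep : pvSolve [x] =
          (if (PySem.Str.isIn "' disconnected " (PySem.Str.strip x)
              || PySem.Str.isIn "Bot(" (PySem.Str.strip x)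
              || !PySem.Str.isIn "(text)" (PySem.Str.strip x)) = true
           then ("", 0) else (PySem.Str.strip x, 1)) := by
        rw [pvSolve]
      rw [hstep, pvRejectEq]
      cases hk : pvKeep (PySem.Str.strip x) with
      | false =>
        have hpvT : pvT [x] = [] := by simp [pvT, List.filter, hk]
        rw [hpvT]; simp
      | true =>
        have hpvT : pvT [x] = [PySem.Str.strip x] := by simp [pvT, List.filter, hk]
        have hp := pvLenPos _ (pvKeep_text _ hk)
        rw [hpvT]
        simp only [List.foldl_cons, List.foldl_nil, pvPick, Bool.not_true, if_pos hp,
          Bool.false_eq_true, if_false, List.length_cons, List.length_nil]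
        norm_num
    | a :: b :: rest =>
      set L : List String := a :: b :: rest with hL
      have h2le : 2 ≤ L.length := by rw [hL]; simp
      set mid : Nat := L.length / 2 with hmid
      have hmid1 : 1 ≤ mid := by omega
      have hmidl : mid < L.length := by omega
      have htake : (L.take mid).length ≤ n := by
        simp only [List.length_take]; omega
      have hdrop : (L.drop mid).length ≤ n := by
        have h1 : L.length ≤ n + 1 := hl
        simp only [List.length_drop]; omega
      have hsplit : L = L.take mid ++ L.drop mid := (List.take_append_drop mid L).symm
      have hstep : pvSolve L =
          ((if PySem.Str.len (pvSolve (L.drop mid)).1 ≤ PySem.Str.len (pvSolve (L.take mid)).1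
            then (pvSolve (L.take mid)).1 else (pvSolve (L.drop mid)).1),
           (pvSolve (L.take mid)).2 + (pvSolve (L.drop mid)).2) := by
        rw [hL]
        rw [pvSolve]
      rw [hstep, ih _ htake, ih _ hdrop]
      conv_rhs => rw [hsplit, pvT_append]
      rw [pvFoldAppend]
      refine Prod.ext ?_ ?_
      · rfl
      · simp only [List.length_append]
        push_cast
        try ring

-- ===== VERDICT =====
theorem extractCase_spec : Claim_equal_extractCase := by
  intro c _
  show extractCase c = extractCase_alt c
  unfold extractCase extractCase_alt
  refine (pvLoopA (fun l => PySem.Str.isIn "' disconnected " l)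
      (fun l => !PySem.Str.isIn "Bot(" l && PySem.Str.isIn "(text)" l)
      PySem.Str.len PySem.Str.strip ((PySem.Str.split? c "\n").getD []) "" 0).trans ?_
  rw [pvSolve_eq ((PySem.Str.split? c "\n").getD []).length _ le_rfl]
  exact Prod.ext rfl (zero_add _)
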